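-- pv_equiv track=rewrite | github.com/Cyborgninja21/pychivalry | pychivalry/style_checks.py | _count_indent_level
-- ===== SOURCE A (Python) =====
-- from typing import List, Optional, Tuple
--
-- def _count_indent_level(line: str) -> Tuple[int, int, bool]:
--     """
--     Count the indentation level of a line.
--
--     Returns:
--         Tuple of (tab_count, space_count, has_mixed)
--     """
--     tabs = 0
--     spaces = 0
--
--     for char in line:
--         if char == '\t':
--             tabs += 1
--         elif char == ' ':
--             spaces += 1
--         else:
--             break
--
--     has_mixed = tabs > 0 and spaces > 0
--     return tabs, spaces, has_mixed
-- ===== SOURCE B (Python) =====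
-- def _count_indent_level(line: str):
--     """Isolate the leading whitespace prefix once, then count within it."""
--     prefix = line[:len(line) - len(line.lstrip(' \t'))]
--     tabs = prefix.count('\t')
--     spaces = prefix.count(' ')
--     return tabs, spaces, tabs > 0 and spaces > 0
-- ===== Notes on version B (the rewrite author's own statement) =====
-- stated objective: simpler
-- what changed: Replaces the char-by-char accumulate-and-break loop with isolating the leading whitespace prefix via lstrip(' \t') and then two independent count passes over it.
import Mathlib
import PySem

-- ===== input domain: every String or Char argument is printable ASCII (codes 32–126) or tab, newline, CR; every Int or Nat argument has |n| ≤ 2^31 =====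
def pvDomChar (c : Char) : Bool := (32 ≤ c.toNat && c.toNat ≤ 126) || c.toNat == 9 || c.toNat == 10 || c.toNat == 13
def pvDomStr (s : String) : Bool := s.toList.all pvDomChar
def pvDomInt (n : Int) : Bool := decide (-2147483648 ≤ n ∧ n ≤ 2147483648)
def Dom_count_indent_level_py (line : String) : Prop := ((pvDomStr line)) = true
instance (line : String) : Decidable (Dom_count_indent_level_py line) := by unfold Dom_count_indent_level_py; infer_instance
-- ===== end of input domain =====

-- B isolates the leading-whitespace prefix via lstrip(' \t') and counts in it; objective: simpler decomposition.
-- ===== PORT A =====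
-- the for-with-break loop over the characters, same accumulators
def pvLoopA : List Char → Int → Int → Int × Int
  | [], tabs, spaces => (tabs, spaces)
  | c :: rest, tabs, spaces =>
    if c == '\t' then pvLoopA rest (tabs + 1) spaces
    else if c == ' ' then pvLoopA rest tabs (spaces + 1)
    else (tabs, spaces)

def count_indent_level_py (line : String) : Int × Int × Bool :=
  let r := pvLoopA line.toList 0 0
  let tabs := r.1
  let spaces := r.2
  let has_mixed := tabs > 0 && spaces > 0
  (tabs, spaces, has_mixed)

-- ===== PORT B =====
def count_indent_level_py_alt (line : String) : Int × Int × Bool :=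
  let cs := line.toList
  -- line.lstrip(' \t'): PySem has no lstrip-with-chars, ported by hand as dropWhile (exact: drops the
  -- longest leading run of ' '/'\t', as Python's lstrip(' \t') does)
  let stripped := cs.dropWhile (fun c => c == ' ' || c == '\t')
  -- line[: len(line) - len(stripped)]
  let pre := PySem.List.slice cs none (some ((cs.length : Int) - (stripped.length : Int)))
  let tabs : Int := pre.count '\t'
  let spaces : Int := pre.count ' '
  (tabs, spaces, tabs > 0 && spaces > 0)

-- ===== PRECONDITION & SPEC =====
def Spec_count_indent_level_py (line : String) (out : Int × Int × Bool) : Prop := out = count_indent_level_py_alt line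
instance (line : String) (out : Int × Int × Bool) : Decidable (Spec_count_indent_level_py line out) := by unfold Spec_count_indent_level_py; infer_instance

-- ===== CLAIM (what is proved, stated in full; the proofs are below) =====
def Claim_equal_count_indent_level_py : Prop := ∀ (line : String), Dom_count_indent_level_py line → Spec_count_indent_level_py line (count_indent_level_py line)

-- ===== LEMMAS AND PROOFS =====

-- take of takeWhile-length is takeWhile
theorem pvTake_takeWhile (cs : List Char) :
    cs.take (cs.takeWhile (fun c => c == ' ' || c == '\t')).length
    = cs.takeWhile (fun c => c == ' ' || c == '\t') := by
  induction cs with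
  | nil => simp
  | cons c rest ih =>
    by_cases h : (c == ' ' || c == '\t') = true
    · simp [List.takeWhile, h, ih]
    · simp [List.takeWhile, h]

-- the prefix B slices out is exactly the takeWhile prefix
theorem pvSlice_eq_takeWhile (cs : List Char) :
    PySem.List.slice cs none
      (some ((cs.length : Int) - ((cs.dropWhile fun c => c == ' ' || c == '\t').length : Int)))
    = cs.takeWhile (fun c => c == ' ' || c == '\t') := by
  have hlen : (cs.takeWhile (fun c => c == ' ' || c == '\t')).length
      + (cs.dropWhile fun c => c == ' ' || c == '\t').length = cs.length := by
    rw [← List.length_append, List.takeWhile_append_dropWhile]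
  have h : (cs.length : Int) - ((cs.dropWhile fun c => c == ' ' || c == '\t').length : Int)
      = ((cs.takeWhile fun c => c == ' ' || c == '\t').length : Int) := by omega
  rw [h, PySem.List.slice_to_natCast]
  exact pvTake_takeWhile cs

-- A's loop computes the counts of '\t' and ' ' in the takeWhile prefix
theorem pvLoopA_eq (cs : List Char) : ∀ (tabs spaces : Int),
    pvLoopA cs tabs spaces
    = (tabs + ((cs.takeWhile fun c => c == ' ' || c == '\t').count '\t' : Int),
       spaces + ((cs.takeWhile fun c => c == ' ' || c == '\t').count ' ' : Int)) := by
  induction cs with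
  | nil => intro tabs spaces; simp [pvLoopA]
  | cons c rest ih =>
    intro tabs spaces
    by_cases ht : c = '\t'
    · subst ht
      simp [pvLoopA, List.takeWhile, ih]
      omega
    · by_cases hs : c = ' '
      · subst hs
        simp [pvLoopA, List.takeWhile, ih]
        omega
      · have h1 : (c == '\t') = false := by simp [ht]
        have h2 : (c == ' ') = false := by simp [hs]
        simp [pvLoopA, List.takeWhile, h1, h2]

-- ===== VERDICT (by name: the statement is the Claim_ definition above) =====
theorem count_indent_level_py_spec : Claim_equal_count_indent_level_py := by
  intro line _
  unfold Spec_count_indent_level_py count_indent_level_py count_indent_level_py_alt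
  simp only [pvSlice_eq_takeWhile, pvLoopA_eq]
  simp
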